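-- pv_equiv track=rewrite | github.com/Semibro/Algorithm | 프로그래머스/2/250136. ［PCCP 기출문제］ 2번 ／ 석유 시추/［PCCP 기출문제］ 2번 ／ 석유 시추.py | solution
-- ===== SOURCE A (Python) =====
-- from collections import deque
--
-- def solution(land):
--     N, M = len(land), len(land[0])
--     direction = [(-1, 0), (1, 0), (0, -1), (0, 1)]
--     visited = [[False for _ in range(M)] for _ in range(N)]
--     oils = [0 for _ in range(M)]
--
--     for j in range(M):
--         for i in range(N):
--             if land[i][j] == 1 and not visited[i][j]:
--                 queue = deque()
--                 colums = set()
--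
--                 queue.append((i, j))
--                 visited[i][j] = True
--                 oil_count = 1
--                 colums.add(j)
--
--                 while queue:
--                     cx, cy = queue.popleft()
--                     for d in direction:
--                         nx, ny = cx + d[0], cy + d[1]
--                         if 0 <= nx < N and 0 <= ny < M:
--                             if land[nx][ny] == 1 and not visited[nx][ny]:
--                                 oil_count += 1
--                                 visited[nx][ny] = True
--                                 queue.append((nx, ny))
--                                 colums.add(ny)
--
--                 for col in colums:
--                     oils[col] += oil_count
--
--     return max(oils)
-- ===== SOURCE B (Python) =====
-- def solution(land):
--     N, M = len(land), len(land[0])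
--     # min-label propagation: every oil cell starts with its own id and repeatedly
--     # takes the smallest label among itself and its oil neighbours until stable;
--     # equal labels then mean "same connected patch".
--     label = {}
--     for i in range(N):
--         for j in range(M):
--             if land[i][j] == 1:
--                 label[(i, j)] = i * M + j
--     changed = True
--     while changed:
--         changed = False
--         for cell in label:
--             i, j = cell
--             for nb in ((i - 1, j), (i + 1, j), (i, j - 1), (i, j + 1)):
--                 if nb in label and label[nb] < label[cell]:
--                     label[cell] = label[nb]
--                     changed = True
--     best = 0
--     for col in range(M):
--         col_labels = {label[(i, col)] for i in range(N) if (i, col) in label}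
--         total = sum(1 for c in label if label[c] in col_labels)
--         if total > best:
--             best = total
--     return best
-- ===== Notes on version B (the rewrite author's own statement) =====
-- stated objective: alternative
-- what changed: Replaces the per-start BFS flood fill with queue/visited-matrix by a grid-wide min-label propagation: every oil cell starts with its own id, repeatedly takes the smallest label among itself and its 4 oil neighbours until a whole pass changes nothing, and the per-column totals are then read off by counting oil cells whose label occurs in that column.
-- outside the precondition, e.g. on solution([]): A raises IndexError, B raises IndexError; on solution([[], [1]]): A raises ValueError, B returns 0; on solution([[1, 1], [1]]): A raises IndexError, B raises IndexError
import Mathlib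
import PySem

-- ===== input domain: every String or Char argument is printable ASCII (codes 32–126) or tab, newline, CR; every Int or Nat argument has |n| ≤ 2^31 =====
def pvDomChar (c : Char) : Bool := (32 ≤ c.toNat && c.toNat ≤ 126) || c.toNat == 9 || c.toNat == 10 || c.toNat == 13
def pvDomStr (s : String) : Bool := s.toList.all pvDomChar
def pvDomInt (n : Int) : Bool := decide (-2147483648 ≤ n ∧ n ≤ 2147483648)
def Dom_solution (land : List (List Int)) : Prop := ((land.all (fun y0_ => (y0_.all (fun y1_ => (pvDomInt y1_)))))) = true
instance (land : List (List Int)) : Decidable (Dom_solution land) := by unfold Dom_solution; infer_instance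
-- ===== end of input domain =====

-- B replaces A's BFS flood fill by min-label propagation to a fixpoint (objective: alternative
-- algorithm; not faster).  Equivalence is proved on all well-shaped non-empty grids (Pre_).

-- ===== PORT A =====
-- land[i][j] (only evaluated at 0 ≤ i < len(land), 0 ≤ j < len(land[0]) ≤ len(land[i]), where it is exact)
def pyAt (land : List (List Int)) (i j : Int) : Int :=
  ((land.getD i.toNat []).getD j.toNat 0)

def dirsA : List (Int × Int) := [(-1,0),(1,0),(0,-1),(0,1)]

-- visited[x][y] = True  (the Boolean matrix, kept as a function of the two indices)
def markV (v : Int → Int → Bool) (x y : Int) : Int → Int → Bool :=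
  fun a b => if a = x ∧ b = y then true else v a b

-- BFS state: (visited, queue, oil_count, colums)
abbrev BfsSt := (Int → Int → Bool) × List (Int × Int) × Int × PySem.Set Int

-- body of `for d in direction: …` for one direction
def bfsStep (land : List (List Int)) (N M : Int) (c : Int × Int) (st : BfsSt) (d : Int × Int) : BfsSt :=
  let nx := c.1 + d.1
  let ny := c.2 + d.2
  if 0 ≤ nx ∧ nx < N ∧ 0 ≤ ny ∧ ny < M then
    if pyAt land nx ny = 1 ∧ st.1 nx ny = false then
      (markV st.1 nx ny, st.2.1 ++ [(nx, ny)], st.2.2.1 + 1, PySem.Set.add st.2.2.2 ny)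
    else st
  else st

-- number of not-yet-visited grid cells (termination measure for the while loop)
def unvis (v : Int → Int → Bool) (N M : ℕ) : ℕ :=
  ∑ i ∈ Finset.range N, ((Finset.range M).filter (fun j : ℕ => v (i:Int) (j:Int) = false)).card

def measSt (N M : Int) (st : BfsSt) : ℕ := unvis st.1 N.toNat M.toNat + st.2.1.length

theorem unvis_mark (v : Int → Int → Bool) (N M : Int) (x y : Int)
    (hx0 : 0 ≤ x) (hxN : x < N) (hy0 : 0 ≤ y) (hyM : y < M) (hv : v x y = false) :
    unvis (markV v x y) N.toNat M.toNat + 1 = unvis v N.toNat M.toNat := by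
  unfold unvis
  have hxmem : x.toNat ∈ Finset.range N.toNat := by
    simp [Finset.mem_range]; omega
  rw [← Finset.add_sum_erase _ _ hxmem, ← Finset.add_sum_erase _ _ hxmem]
  have hrest : ∀ i ∈ (Finset.range N.toNat).erase x.toNat,
      ((Finset.range M.toNat).filter (fun j : ℕ => markV v x y (i:Int) (j:Int) = false)).card
      = ((Finset.range M.toNat).filter (fun j : ℕ => v (i:Int) (j:Int) = false)).card := by
    intro i hi
    congr 1
    apply Finset.filter_congr
    intro j _
    have hne : (i:Int) ≠ x := by
      rcases Finset.mem_erase.mp hi with ⟨h1, _⟩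
      omega
    simp [markV, hne]
  rw [Finset.sum_congr rfl hrest]
  have hxx : ((x.toNat:Int)) = x := Int.toNat_of_nonneg hx0
  have hyy : ((y.toNat:Int)) = y := Int.toNat_of_nonneg hy0
  have hrow : ((Finset.range M.toNat).filter (fun j : ℕ => markV v x y (x.toNat:Int) (j:Int) = false))
      = ((Finset.range M.toNat).filter (fun j : ℕ => v (x.toNat:Int) (j:Int) = false)).erase y.toNat := by
    ext j
    simp only [Finset.mem_erase, Finset.mem_filter, Finset.mem_range, markV]
    constructor
    · rintro ⟨hj, hm⟩
      by_cases hjy : (j:Int) = y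
      · rw [if_pos ⟨hxx, hjy⟩] at hm; cases hm
      · refine ⟨by omega, hj, ?_⟩
        rwa [if_neg (fun h => hjy h.2)] at hm
    · rintro ⟨hjy, hj, hm⟩
      have hne : ¬(((x.toNat:Int)) = x ∧ (j:Int) = y) := by
        rintro ⟨-, h2⟩; omega
      exact ⟨hj, by rwa [if_neg hne]⟩
  rw [hrow]
  have hymem : y.toNat ∈ (Finset.range M.toNat).filter (fun j : ℕ => v (x.toNat:Int) (j:Int) = false) := by
    simp only [Finset.mem_filter, Finset.mem_range]
    constructor
    · omega
    · rw [hxx, hyy]; exact hv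
  rw [Finset.card_erase_of_mem hymem]
  have := Finset.card_pos.mpr ⟨y.toNat, hymem⟩
  omega

theorem bfsStep_meas (land : List (List Int)) (N M : Int) (c : Int × Int) (st : BfsSt) (d : Int × Int) :
    measSt N M (bfsStep land N M c st d) = measSt N M st := by
  unfold bfsStep
  dsimp only
  split_ifs with h1 h2
  · obtain ⟨ha, hb, hc, hd⟩ := h1
    have := unvis_mark st.1 N M (c.1 + d.1) (c.2 + d.2) ha hb hc hd h2.2
    simp only [measSt, List.length_append, List.length_cons, List.length_nil]
    omega
  · rfl
  · rfl

theorem bfsFold_meas (land : List (List Int)) (N M : Int) (c : Int × Int) (ds : List (Int × Int)) (st : BfsSt) :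
    measSt N M (ds.foldl (bfsStep land N M c) st) = measSt N M st := by
  induction ds generalizing st with
  | nil => rfl
  | cons d ds ih => simp [List.foldl, ih, bfsStep_meas]

-- `while queue: cx, cy = queue.popleft(); for d in direction: …`
def bfsLoop (land : List (List Int)) (N M : Int) (v : Int → Int → Bool)
    (queue : List (Int × Int)) (cnt : Int) (cols : PySem.Set Int) :
    (Int → Int → Bool) × Int × PySem.Set Int :=
  match queue with
  | [] => (v, cnt, cols)
  | c :: q =>
      bfsLoop land N M (dirsA.foldl (bfsStep land N M c) (v, q, cnt, cols)).1
        (dirsA.foldl (bfsStep land N M c) (v, q, cnt, cols)).2.1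
        (dirsA.foldl (bfsStep land N M c) (v, q, cnt, cols)).2.2.1
        (dirsA.foldl (bfsStep land N M c) (v, q, cnt, cols)).2.2.2
termination_by unvis v N.toNat M.toNat + queue.length
decreasing_by
  have h := bfsFold_meas land N M c dirsA (v, q, cnt, cols)
  simp only [measSt] at h
  simp only [List.length_cons]
  omega

-- body of the scan `if land[i][j] == 1 and not visited[i][j]: … ; for col in colums: oils[col] += oil_count`
-- (the oils list is kept as a function of the column index and materialised at the end)
def procCell (land : List (List Int)) (N M : Int)
    (st : (Int → Int → Bool) × (Int → Int)) (i j : Int) :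
    (Int → Int → Bool) × (Int → Int) :=
  if pyAt land i j = 1 ∧ st.1 i j = false then
    let r := bfsLoop land N M (markV st.1 i j) [(i, j)] 1 (PySem.Set.add PySem.Set.empty j)
    (r.1, r.2.2.foldl (fun oils col => fun c => if c = col then oils c + r.2.1 else oils c) st.2)
  else st

def solution (land : List (List Int)) : Int :=
  let N : Int := PySem.List.len land
  let M : Int := PySem.List.len (land.headD [])
  let fin := (List.range M.toNat).foldl (fun st (j : ℕ) =>
      (List.range N.toNat).foldl (fun st (i : ℕ) => procCell land N M st (i:Int) (j:Int)) st)
      (fun _ _ => false, fun _ => (0:Int))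
  (PySem.List.max? ((List.range M.toNat).map (fun (j : ℕ) => fin.2 (j : Int))) (fun x => x)).getD 0

-- ===== PORT B =====
def nbrsB (c : Int × Int) : List (Int × Int) :=
  [(c.1 - 1, c.2), (c.1 + 1, c.2), (c.1, c.2 - 1), (c.1, c.2 + 1)]

-- body of `for cell in label: for nb in (…): if nb in label and label[nb] < label[cell]: …`
def sweepStep (st : PySem.Dict (Int × Int) Int × Bool) (cell : Int × Int) :
    PySem.Dict (Int × Int) Int × Bool :=
  (nbrsB cell).foldl (fun st nb =>
    match st.1.get? nb, st.1.get? cell with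
    | some vn, some vc => if vn < vc then (st.1.insert cell vn, true) else st
    | _, _ => st) st

-- one pass of the while body (changed = False; the for loop over the dict's keys)
def sweep (d : PySem.Dict (Int × Int) Int) : PySem.Dict (Int × Int) Int × Bool :=
  d.keys.foldl sweepStep (d, false)

-- `while changed:` — labels are nonnegative and their sum strictly decreases on every changed
-- sweep, so valsum d + 1 rounds always reach the fixpoint (proved below)
def propagate : ℕ → PySem.Dict (Int × Int) Int → PySem.Dict (Int × Int) Int
  | 0, d => d
  | f + 1, d =>
      let r := sweep d
      if r.2 then propagate f r.1 else r.1

def valsum (d : PySem.Dict (Int × Int) Int) : ℕ := (d.values.map Int.toNat).sum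

-- label = {(i, j): i * M + j  for oil cells}
def buildLabel (land : List (List Int)) (N M : Int) : PySem.Dict (Int × Int) Int :=
  (List.range N.toNat).foldl (fun d (i : ℕ) =>
    (List.range M.toNat).foldl (fun d (j : ℕ) =>
      if pyAt land (i:Int) (j:Int) = 1 then d.insert ((i:Int), (j:Int)) ((i:Int) * M + (j:Int)) else d) d)
    PySem.Dict.empty

def solution_alt (land : List (List Int)) : Int :=
  let N : Int := PySem.List.len land
  let M : Int := PySem.List.len (land.headD [])
  let lab0 := buildLabel land N M
  let lab := propagate (valsum lab0 + 1) lab0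
  (List.range M.toNat).foldl (fun best (j : ℕ) =>
    let colLabels : PySem.Set Int := (List.range N.toNat).foldl (fun s (i : ℕ) =>
        match lab.get? ((i:Int), (j:Int)) with
        | some v => PySem.Set.add s v
        | none => s) PySem.Set.empty
    let total : Int := ((lab.keys.filter (fun c => colLabels.contains (lab.getD c 0))).length : Int)
    if total > best then total else best) 0

-- ===== PRECONDITION & SPEC =====
-- Pre_ excludes exactly the inputs where the Python A raises: the empty grid and a grid whose
-- first row is empty (max([]) / IndexError on land[0]) and ragged grids with a row shorter than
-- row 0 (IndexError on land[i][j]).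
def Pre_solution (land : List (List Int)) : Prop :=
  land ≠ [] ∧ 0 < (land.headD []).length ∧ ∀ row ∈ land, (land.headD []).length ≤ row.length
instance (land : List (List Int)) : Decidable (Pre_solution land) := by unfold Pre_solution; infer_instance

def pvWitness_solution : List (List Int) := [[1, 0], [0, 1]]

def Spec_solution (land : List (List Int)) (out : Int) : Prop := out = solution_alt land
instance (land : List (List Int)) (out : Int) : Decidable (Spec_solution land out) := by unfold Spec_solution; infer_instance

-- ===== CLAIM (what is proved, stated in full; the proofs are below) =====
def Claim_equal_solution : Prop := ∀ (land : List (List Int)), Dom_solution land → Pre_solution land → Spec_solution land (solution land)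

-- ===== LEMMAS AND PROOFS =====

-- The grid-graph semantics both proofs are driven through.
def inGrid (N M : Int) (c : Int × Int) : Prop := 0 ≤ c.1 ∧ c.1 < N ∧ 0 ≤ c.2 ∧ c.2 < M

def oilCell (land : List (List Int)) (N M : Int) (c : Int × Int) : Prop :=
  inGrid N M c ∧ pyAt land c.1 c.2 = 1

def adjC (land : List (List Int)) (N M : Int) (c d : Int × Int) : Prop :=
  oilCell land N M c ∧ oilCell land N M d ∧ ((c.1 - d.1).natAbs + (c.2 - d.2).natAbs = 1)

def reachC (land : List (List Int)) (N M : Int) : (Int × Int) → (Int × Int) → Prop :=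
  Relation.ReflTransGen (adjC land N M)

def touchC (land : List (List Int)) (N M : Int) (c : Int × Int) (col : Int) : Prop :=
  ∃ x : Int, reachC land N M c (x, col)

-- the value both programs compute per column
noncomputable def Scol (land : List (List Int)) (N M : Int) (col : Int) : ℕ :=
  {c : Int × Int | oilCell land N M c ∧ touchC land N M c col}.ncard

theorem adjC_symm (land : List (List Int)) (N M : Int) {c d : Int × Int}
    (h : adjC land N M c d) : adjC land N M d c := by
  obtain ⟨h1, h2, h3⟩ := h
  exact ⟨h2, h1, by omega⟩

theorem reachC_symm (land : List (List Int)) (N M : Int) {c d : Int × Int}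
    (h : reachC land N M c d) : reachC land N M d c := by
  induction h with
  | refl => exact Relation.ReflTransGen.refl
  | tail _ hbc ih =>
      exact Relation.ReflTransGen.trans (Relation.ReflTransGen.single (adjC_symm land N M hbc)) ih

theorem reachC_oil (land : List (List Int)) (N M : Int) {c d : Int × Int}
    (hc : oilCell land N M c) (h : reachC land N M c d) : oilCell land N M d := by
  induction h with
  | refl => exact hc
  | tail _ hbc _ => exact hbc.2.1

theorem oilCells_finite (land : List (List Int)) (N M : Int) :
    {c : Int × Int | oilCell land N M c}.Finite := by
  apply Set.Finite.subset (Set.finite_Icc ((0 : Int), (0 : Int)) (N - 1, M - 1))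
  rintro ⟨a, b⟩ ⟨⟨h1, h2, h3, h4⟩, -⟩
  constructor <;> constructor <;> simp <;> omega

theorem adjC_cases (land : List (List Int)) (N M : Int) {c d : Int × Int}
    (h : adjC land N M c d) : ∃ δ ∈ dirsA, d = (c.1 + δ.1, c.2 + δ.2) := by
  obtain ⟨c1, c2⟩ := c
  obtain ⟨d1, d2⟩ := d
  obtain ⟨-, -, hd⟩ := h
  simp only [] at hd
  have hcase : (d1 = c1 + -1 ∧ d2 = c2) ∨ (d1 = c1 + 1 ∧ d2 = c2) ∨
      (d2 = c2 + -1 ∧ d1 = c1) ∨ (d2 = c2 + 1 ∧ d1 = c1) := by omega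
  rcases hcase with ⟨h1, h2⟩ | ⟨h1, h2⟩ | ⟨h1, h2⟩ | ⟨h1, h2⟩
  · exact ⟨(-1, 0), by simp [dirsA], by simp [h1, h2]⟩
  · exact ⟨(1, 0), by simp [dirsA], by simp [h1, h2]⟩
  · exact ⟨(0, -1), by simp [dirsA], by simp [h1, h2]⟩
  · exact ⟨(0, 1), by simp [dirsA], by simp [h1, h2]⟩

theorem closed_reach (land : List (List Int)) (N M : Int) {V : Set (Int × Int)}
    (hV : ∀ a ∈ V, ∀ b, adjC land N M a b → b ∈ V) {a b : Int × Int}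
    (h : reachC land N M a b) (ha : a ∈ V) : b ∈ V := by
  induction h with
  | refl => exact ha
  | tail _ hbc ih => exact hV _ ih _ hbc

-- the frontier property: every fully processed discovered cell has its neighbours discovered
def Front (land : List (List Int)) (N M : Int) (D : Set (Int × Int)) (l : List (Int × Int)) : Prop :=
  ∀ a ∈ D, a ∉ l → ∀ b, adjC land N M a b → b ∈ D

structure BfsInv (land : List (List Int)) (N M : Int) (V₀ : Set (Int × Int)) (s : Int × Int)
    (D : Set (Int × Int)) (st : BfsSt) : Prop where
  hvis : ∀ c : Int × Int, st.1 c.1 c.2 = true ↔ c ∈ V₀ ∨ c ∈ D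
  hsD : s ∈ D
  hD : ∀ c ∈ D, reachC land N M s c
  hq : ∀ c ∈ st.2.1, c ∈ D
  hfin : D.Finite
  hcnt : st.2.2.1 = (D.ncard : Int)
  hcols : ∀ y : Int, y ∈ st.2.2.2 ↔ ∃ c ∈ D, c.2 = y
  hnd : st.2.2.2.Nodup

theorem bfsStep_inv (land : List (List Int)) (N M : Int) {V₀ : Set (Int × Int)} {s : Int × Int}
    (hV₀c : ∀ a ∈ V₀, ∀ b, adjC land N M a b → b ∈ V₀)
    (hs : oilCell land N M s) (hsV : s ∉ V₀)
    {D : Set (Int × Int)} {st : BfsSt} (c δ : Int × Int) (hδ : δ.1.natAbs + δ.2.natAbs = 1)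
    (hc : c ∈ D) (hinv : BfsInv land N M V₀ s D st) (hfr : Front land N M D (c :: st.2.1)) :
    ∃ D', D ⊆ D' ∧ BfsInv land N M V₀ s D' (bfsStep land N M c st δ) ∧
      Front land N M D' (c :: (bfsStep land N M c st δ).2.1) ∧
      (adjC land N M c (c.1 + δ.1, c.2 + δ.2) → (c.1 + δ.1, c.2 + δ.2) ∈ D') ∧
      (∀ x ∈ st.2.1, x ∈ (bfsStep land N M c st δ).2.1) := by
  have hRV : ∀ x, reachC land N M s x → x ∉ V₀ := by
    intro x hx hxV
    exact hsV (closed_reach land N M hV₀c (reachC_symm land N M hx) hxV)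
  set n : Int × Int := (c.1 + δ.1, c.2 + δ.2) with hn
  unfold bfsStep
  dsimp only
  by_cases hb : 0 ≤ c.1 + δ.1 ∧ c.1 + δ.1 < N ∧ 0 ≤ c.2 + δ.2 ∧ c.2 + δ.2 < M
  · rw [if_pos hb]
    by_cases hg : pyAt land (c.1 + δ.1) (c.2 + δ.2) = 1 ∧ st.1 (c.1 + δ.1) (c.2 + δ.2) = false
    · rw [if_pos hg]
      refine ⟨insert n D, Set.subset_insert _ _, ?_, ?_, fun _ => Set.mem_insert _ _,
        fun x hx => List.mem_append_left _ hx⟩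
      · have hnD : n ∉ D := by
          intro hmem
          have := (hinv.hvis n).mpr (Or.inr hmem)
          rw [hg.2] at this
          cases this
        have hreach : reachC land N M s n := by
          refine Relation.ReflTransGen.tail (hinv.hD c hc) ?_
          refine ⟨reachC_oil land N M hs (hinv.hD c hc), ⟨⟨hb.1, hb.2.1, hb.2.2.1, hb.2.2.2⟩, hg.1⟩, ?_⟩
          simp only [hn]
          omega
        refine ⟨?_, Set.mem_insert_of_mem _ hinv.hsD, ?_, ?_, hinv.hfin.insert n, ?_, ?_, ?_⟩
        · intro x
          simp only [markV]
          constructor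
          · intro hx
            by_cases hxn : x.1 = c.1 + δ.1 ∧ x.2 = c.2 + δ.2
            · right
              have hxeq : x = n := Prod.ext_iff.mpr ⟨hxn.1, hxn.2⟩
              rw [hxeq]
              exact Set.mem_insert _ _
            · rw [if_neg hxn] at hx
              rcases (hinv.hvis x).mp hx with h | h
              · exact Or.inl h
              · exact Or.inr (Set.mem_insert_of_mem _ h)
          · intro hx
            rcases hx with h | h
            · by_cases hxn : x.1 = c.1 + δ.1 ∧ x.2 = c.2 + δ.2
              · rw [if_pos hxn]
              · rw [if_neg hxn]
                exact (hinv.hvis x).mpr (Or.inl h)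
            · rcases Set.mem_insert_iff.mp h with h | h
              · rw [if_pos (by rw [h, hn]; exact ⟨rfl, rfl⟩)]
              · by_cases hxn : x.1 = c.1 + δ.1 ∧ x.2 = c.2 + δ.2
                · rw [if_pos hxn]
                · rw [if_neg hxn]
                  exact (hinv.hvis x).mpr (Or.inr h)
        · intro x hx
          rcases Set.mem_insert_iff.mp hx with h | h
          · rw [h]; exact hreach
          · exact hinv.hD x h
        · intro x hx
          rcases List.mem_append.mp hx with h | h
          · exact Set.mem_insert_of_mem _ (hinv.hq x h)
          · rw [List.mem_singleton.mp h]
            exact Set.mem_insert _ _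
        · simp only [Set.ncard_insert_of_notMem hnD hinv.hfin, hinv.hcnt]
          push_cast
          ring
        · intro y
          rw [PySem.Set.mem_add]
          constructor
          · rintro (h | h)
            · obtain ⟨x, hx1, hx2⟩ := (hinv.hcols y).mp h
              exact ⟨x, Set.mem_insert_of_mem _ hx1, hx2⟩
            · exact ⟨n, Set.mem_insert _ _, h.symm⟩
          · rintro ⟨x, hx1, hx2⟩
            rcases Set.mem_insert_iff.mp hx1 with h | h
            · right; rw [← hx2, h]
            · left; exact (hinv.hcols y).mpr ⟨x, h, hx2⟩
        · exact PySem.Set.nodup_add _ _ hinv.hnd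
      · intro a ha hal b hadj
        rcases Set.mem_insert_iff.mp ha with h | h
        · exact absurd (List.mem_cons.mpr (Or.inr (List.mem_append_right _
            (by rw [h, hn]; exact List.mem_singleton_self _)))) hal
        · have htail := hfr a h (fun hmem => hal (by
            rcases List.mem_cons.mp hmem with h1 | h1
            · exact List.mem_cons.mpr (Or.inl h1)
            · exact List.mem_cons.mpr (Or.inr (List.mem_append_left _ h1)))) b hadj
          exact Set.mem_insert_of_mem _ htail
    · rw [if_neg hg]
      refine ⟨D, le_refl _, hinv, hfr, ?_, fun x hx => hx⟩
      intro hadj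
      rcases Decidable.not_and_iff_not_or_not.mp hg with h | h
      · exact absurd hadj.2.1.2 h
      · have hvtrue : st.1 (c.1 + δ.1) (c.2 + δ.2) = true := by
          cases hvv : st.1 (c.1 + δ.1) (c.2 + δ.2)
          · exact absurd hvv h
          · rfl
        rcases (hinv.hvis n).mp hvtrue with h1 | h1
        · exfalso
          have : reachC land N M s n := Relation.ReflTransGen.tail (hinv.hD c hc) hadj
          exact hRV n this h1
        · exact h1
  · rw [if_neg hb]
    refine ⟨D, le_refl _, hinv, hfr, ?_, fun x hx => hx⟩
    intro hadj
    obtain ⟨-, ⟨hg, -⟩, -⟩ := hadj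
    exact absurd ⟨hg.1, hg.2.1, hg.2.2.1, hg.2.2.2⟩ hb

theorem bfsFold_inv (land : List (List Int)) (N M : Int) {V₀ : Set (Int × Int)} {s : Int × Int}
    (hV₀c : ∀ a ∈ V₀, ∀ b, adjC land N M a b → b ∈ V₀)
    (hs : oilCell land N M s) (hsV : s ∉ V₀) (c : Int × Int)
    (ds : List (Int × Int)) (hds : ∀ δ ∈ ds, δ.1.natAbs + δ.2.natAbs = 1) :
    ∀ {D : Set (Int × Int)} {st : BfsSt}, c ∈ D →
    BfsInv land N M V₀ s D st → Front land N M D (c :: st.2.1) →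
    ∃ D', D ⊆ D' ∧ BfsInv land N M V₀ s D' (ds.foldl (bfsStep land N M c) st) ∧
      Front land N M D' (c :: (ds.foldl (bfsStep land N M c) st).2.1) ∧
      (∀ δ ∈ ds, adjC land N M c (c.1 + δ.1, c.2 + δ.2) → (c.1 + δ.1, c.2 + δ.2) ∈ D') := by
  induction ds with
  | nil =>
      intro D st hc hinv hfr
      exact ⟨D, le_refl _, hinv, hfr, by simp⟩
  | cons δ ds ih =>
      intro D st hc hinv hfr
      obtain ⟨D1, hD1, hinv1, hfr1, hmem1, -⟩ :=
        bfsStep_inv land N M hV₀c hs hsV c δ (hds δ (List.mem_cons_self)) hc hinv hfr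
      obtain ⟨D2, hD2, hinv2, hfr2, hmem2⟩ :=
        ih (fun x hx => hds x (List.mem_cons_of_mem _ hx)) (hD1 hc) hinv1 hfr1
      refine ⟨D2, fun x hx => hD2 (hD1 hx), hinv2, hfr2, ?_⟩
      intro δ' hδ' hadj
      rcases List.mem_cons.mp hδ' with h | h
      · subst h
        exact hD2 (hmem1 hadj)
      · exact hmem2 δ' h hadj

theorem bfsLoop_spec (land : List (List Int)) (N M : Int) {V₀ : Set (Int × Int)} {s : Int × Int}
    (hV₀c : ∀ a ∈ V₀, ∀ b, adjC land N M a b → b ∈ V₀)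
    (hs : oilCell land N M s) (hsV : s ∉ V₀) :
    ∀ (n : ℕ) (v : Int → Int → Bool) (q : List (Int × Int)) (cnt : Int) (cols : PySem.Set Int)
      (D : Set (Int × Int)), measSt N M (v, q, cnt, cols) = n →
      BfsInv land N M V₀ s D (v, q, cnt, cols) → Front land N M D q →
      (∀ c : Int × Int, (bfsLoop land N M v q cnt cols).1 c.1 c.2 = true ↔
          c ∈ V₀ ∨ reachC land N M s c) ∧
      (bfsLoop land N M v q cnt cols).2.1 = ({c | reachC land N M s c}.ncard : Int) ∧
      (∀ y : Int, y ∈ (bfsLoop land N M v q cnt cols).2.2 ↔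
          ∃ c, reachC land N M s c ∧ c.2 = y) ∧
      (bfsLoop land N M v q cnt cols).2.2.Nodup := by
  intro n
  induction n using Nat.strong_induction_on with
  | _ n ih =>
      intro v q cnt cols D hmeas hinv hfr
      match q with
      | [] =>
          have hDR : D = {c | reachC land N M s c} := by
            apply Set.Subset.antisymm
            · exact fun c hc => hinv.hD c hc
            · intro c hc
              simp only [Set.mem_setOf_eq] at hc
              induction hc with
              | refl => exact hinv.hsD
              | tail _ hbc ihr => exact hfr _ ihr (List.not_mem_nil) _ hbc
          rw [bfsLoop]
          refine ⟨?_, ?_, ?_, hinv.hnd⟩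
          · intro c
            rw [hinv.hvis c, hDR]
            simp only [Set.mem_setOf_eq]
          · rw [hinv.hcnt, hDR]
          · intro y
            rw [hinv.hcols y, hDR]
            simp only [Set.mem_setOf_eq]
      | c :: q' =>
          have hcD : c ∈ D := hinv.hq c (List.mem_cons_self)
          have hinv' : BfsInv land N M V₀ s D (v, q', cnt, cols) :=
            ⟨hinv.hvis, hinv.hsD, hinv.hD,
              fun x hx => hinv.hq x (List.mem_cons_of_mem _ hx),
              hinv.hfin, hinv.hcnt, hinv.hcols, hinv.hnd⟩
          have hfr' : Front land N M D (c :: (v, q', cnt, cols).2.1) := hfr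
          obtain ⟨D', hDD, hinv2, hfr2, hmem2⟩ := bfsFold_inv land N M hV₀c hs hsV c dirsA
            (by intro δ hδ; fin_cases hδ <;> rfl) hcD hinv' hfr'
          have hfr3 : Front land N M D' (dirsA.foldl (bfsStep land N M c) (v, q', cnt, cols)).2.1 := by
            intro a ha hal b hadj
            by_cases hac : a = c
            · subst hac
              obtain ⟨δ, hδ1, hδ2⟩ := adjC_cases land N M hadj
              rw [hδ2]
              exact hmem2 δ hδ1 (hδ2 ▸ hadj)
            · exact hfr2 a ha (fun hmem => by
                rcases List.mem_cons.mp hmem with h | h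
                · exact hac h
                · exact hal h) b hadj
          have hmeas' : measSt N M (dirsA.foldl (bfsStep land N M c) (v, q', cnt, cols)) < n := by
            have h1 := bfsFold_meas land N M c dirsA (v, q', cnt, cols)
            simp only [measSt] at h1 hmeas ⊢
            simp only [List.length_cons] at hmeas
            omega
          have hres := ih _ hmeas' (dirsA.foldl (bfsStep land N M c) (v, q', cnt, cols)).1
            (dirsA.foldl (bfsStep land N M c) (v, q', cnt, cols)).2.1
            (dirsA.foldl (bfsStep land N M c) (v, q', cnt, cols)).2.2.1
            (dirsA.foldl (bfsStep land N M c) (v, q', cnt, cols)).2.2.2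
            D' rfl hinv2 hfr3
          rw [bfsLoop]
          exact hres

theorem foldl_addcols (l : List Int) (hnd : l.Nodup) (cnt : Int) (oils : Int → Int) (col : Int) :
    (l.foldl (fun o c2 => fun c => if c = c2 then o c + cnt else o c) oils) col
      = oils col + (if col ∈ l then cnt else 0) := by
  induction l generalizing oils with
  | nil => simp
  | cons a t ih =>
      simp only [List.foldl_cons]
      rw [ih (List.Nodup.of_cons hnd)]
      by_cases hca : col = a
      · subst hca
        have hnt : col ∉ t := (List.nodup_cons.mp hnd).1
        simp [hnt]
      · simp [hca, List.mem_cons]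

def ScanInv (land : List (List Int)) (N M : Int) (st : (Int → Int → Bool) × (Int → Int))
    (P : Set (Int × Int)) : Prop :=
  (∀ c : Int × Int, st.1 c.1 c.2 = true ↔ c ∈ P) ∧
  (∀ c ∈ P, oilCell land N M c) ∧
  (∀ a ∈ P, ∀ b, adjC land N M a b → b ∈ P) ∧
  (∀ col : Int, st.2 col = (((P ∩ {c | touchC land N M c col}).ncard : ℕ) : Int))

theorem procCell_spec (land : List (List Int)) (N M : Int)
    {st : (Int → Int → Bool) × (Int → Int)} {P : Set (Int × Int)} (i j : Int)
    (hij : inGrid N M (i, j)) (hinv : ScanInv land N M st P) :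
    ∃ P', ScanInv land N M (procCell land N M st i j) P' ∧ P ⊆ P' ∧
      (pyAt land i j = 1 → (i, j) ∈ P') := by
  obtain ⟨hvis, hoil, hclosed, hoils⟩ := hinv
  have hPfin : P.Finite := (oilCells_finite land N M).subset (fun c hc => hoil c hc)
  unfold procCell
  by_cases hg : pyAt land i j = 1 ∧ st.1 i j = false
  · rw [if_pos hg]
    set s : Int × Int := (i, j) with hsdef
    have hs : oilCell land N M s := ⟨hij, hg.1⟩
    have hsV : s ∉ P := fun hmem => by
      have := (hvis s).mpr hmem
      rw [hg.2] at this
      cases this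
    have hinv0 : BfsInv land N M P s {s} (markV st.1 i j, [(i, j)], 1,
        PySem.Set.add PySem.Set.empty j) := by
      refine ⟨?_, rfl, ?_, ?_, Set.finite_singleton s, ?_, ?_, ?_⟩
      · intro c
        simp only [markV]
        constructor
        · intro hx
          by_cases hcs : c.1 = i ∧ c.2 = j
          · exact Or.inr (Prod.ext_iff.mpr hcs)
          · rw [if_neg hcs] at hx
            exact Or.inl ((hvis c).mp hx)
        · intro hx
          rcases hx with h | h
          · by_cases hcs : c.1 = i ∧ c.2 = j
            · rw [if_pos hcs]
            · rw [if_neg hcs]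
              exact (hvis c).mpr h
          · rw [if_pos ⟨congrArg Prod.fst h, congrArg Prod.snd h⟩]
      · intro c hc
        rw [Set.mem_singleton_iff.mp hc]
        exact Relation.ReflTransGen.refl
      · intro c hc
        rw [List.mem_singleton.mp hc]
        rfl
      · rw [Set.ncard_singleton]
        rfl
      · intro y
        rw [PySem.Set.mem_add]
        simp only [PySem.Set.empty, List.not_mem_nil, false_or, hsdef]
        constructor
        · intro h
          exact ⟨(i, j), rfl, h.symm⟩
        · rintro ⟨c, hc, h2⟩
          rw [Set.mem_singleton_iff.mp hc] at h2
          exact h2.symm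
      · exact PySem.Set.nodup_add _ _ (List.nodup_nil)
    have hfr0 : Front land N M {s} [(i, j)] := by
      intro a ha hal
      exact absurd (by rw [Set.mem_singleton_iff.mp ha]; exact List.mem_singleton_self _) hal
    obtain ⟨hrv, hrc, hrcols, hrnd⟩ := bfsLoop_spec land N M hclosed hs hsV _
      (markV st.1 i j) [(i, j)] 1 (PySem.Set.add PySem.Set.empty j) {s} rfl hinv0 hfr0
    set r := bfsLoop land N M (markV st.1 i j) [(i, j)] 1 (PySem.Set.add PySem.Set.empty j)
    set R : Set (Int × Int) := {c | reachC land N M s c} with hRdef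
    have hRfin : R.Finite := (oilCells_finite land N M).subset
      (fun c hc => reachC_oil land N M hs hc)
    have hPR : ∀ c ∈ R, c ∉ P := by
      intro c hc hmem
      exact hsV (closed_reach land N M hclosed (reachC_symm land N M hc) hmem)
    refine ⟨P ∪ R, ⟨?_, ?_, ?_, ?_⟩, Set.subset_union_left, ?_⟩
    · intro c
      rw [hrv c]
      rfl
    · intro c hc
      rcases hc with h | h
      · exact hoil c h
      · exact reachC_oil land N M hs h
    · intro a ha b hadj
      rcases ha with h | h
      · exact Or.inl (hclosed a h b hadj)
      · exact Or.inr (Relation.ReflTransGen.tail h hadj)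
    · intro col
      simp only []
      rw [foldl_addcols _ hrnd, hoils col, hrc]
      have hsplit : (P ∪ R) ∩ {c | touchC land N M c col}
          = (P ∩ {c | touchC land N M c col}) ∪ (R ∩ {c | touchC land N M c col}) :=
        Set.union_inter_distrib_right P R _
      have hdisj : Disjoint (P ∩ {c | touchC land N M c col}) (R ∩ {c | touchC land N M c col}) := by
        rw [Set.disjoint_left]
        rintro c ⟨h1, -⟩ ⟨h2, -⟩
        exact hPR c h2 h1
      rw [hsplit, Set.ncard_union_eq hdisj (hPfin.subset Set.inter_subset_left)
        (hRfin.subset Set.inter_subset_left)]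
      by_cases hcol : col ∈ r.2.2
      · obtain ⟨c, hc1, hc2⟩ := (hrcols col).mp hcol
        have hRT : R ∩ {c | touchC land N M c col} = R := by
          rw [Set.inter_eq_left]
          intro a ha
          have hceq : (c.1, col) = c := Prod.ext_iff.mpr ⟨rfl, hc2.symm⟩
          exact ⟨c.1, Relation.ReflTransGen.trans (reachC_symm land N M ha)
            (by rw [hceq]; exact hc1)⟩
        rw [if_pos hcol, hRT]
        push_cast
        ring
      · have hRT : R ∩ {c | touchC land N M c col} = ∅ := by
          ext a
          simp only [Set.mem_inter_iff, Set.mem_setOf_eq, Set.mem_empty_iff_false, iff_false]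
          rintro ⟨ha, x, hx⟩
          exact hcol ((hrcols col).mpr ⟨(x, col), Relation.ReflTransGen.trans ha hx, rfl⟩)
        rw [if_neg hcol, hRT]
        simp
    · intro
      exact Or.inr Relation.ReflTransGen.refl
  · rw [if_neg hg]
    refine ⟨P, ⟨hvis, hoil, hclosed, hoils⟩, le_refl _, ?_⟩
    intro h1
    rcases Decidable.not_and_iff_not_or_not.mp hg with h | h
    · exact absurd h1 h
    · cases hvv : st.1 i j
      · exact absurd hvv h
      · exact (hvis (i, j)).mp hvv

theorem scanRow_spec (land : List (List Int)) (N M : Int) (j : Int) (hj : 0 ≤ j ∧ j < M) :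
    ∀ (l : List ℕ) (st : (Int → Int → Bool) × (Int → Int)) (P : Set (Int × Int)),
      (∀ i ∈ l, ((i : Int)) < N) → ScanInv land N M st P →
      ∃ P', ScanInv land N M (l.foldl (fun st (i : ℕ) => procCell land N M st (i : Int) j) st) P' ∧
        P ⊆ P' ∧ (∀ i ∈ l, pyAt land (i : Int) j = 1 → (((i : Int)), j) ∈ P') := by
  intro l
  induction l with
  | nil =>
      intro st P _ hinv
      exact ⟨P, hinv, le_refl _, by simp⟩
  | cons a t ih =>
      intro st P hl hinv
      obtain ⟨P1, hinv1, hP1, hmem1⟩ := procCell_spec land N M (a : Int) j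
        ⟨Int.natCast_nonneg a, hl a List.mem_cons_self, hj.1, hj.2⟩ hinv
      obtain ⟨P2, hinv2, hP2, hmem2⟩ := ih _ P1
        (fun i hi => hl i (List.mem_cons_of_mem _ hi)) hinv1
      refine ⟨P2, hinv2, fun x hx => hP2 (hP1 hx), ?_⟩
      intro i hi hoi
      rcases List.mem_cons.mp hi with h | h
      · subst h
        exact hP2 (hmem1 hoi)
      · exact hmem2 i h hoi

theorem scanGrid_spec (land : List (List Int)) (N M : Int) :
    ∀ (lj : List ℕ) (st : (Int → Int → Bool) × (Int → Int)) (P : Set (Int × Int)),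
      (∀ j ∈ lj, ((j : Int)) < M) → ScanInv land N M st P →
      ∃ P', ScanInv land N M (lj.foldl (fun st (j : ℕ) =>
          (List.range N.toNat).foldl (fun st (i : ℕ) => procCell land N M st (i : Int) (j : Int)) st) st) P' ∧
        P ⊆ P' ∧
        (∀ j ∈ lj, ∀ i ∈ List.range N.toNat,
          pyAt land (i : Int) (j : Int) = 1 → (((i : Int)), ((j : Int))) ∈ P') := by
  intro lj
  induction lj with
  | nil =>
      intro st P _ hinv
      exact ⟨P, hinv, le_refl _, by simp⟩
  | cons b t ih =>
      intro st P hl hinv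
      obtain ⟨P1, hinv1, hP1, hmem1⟩ := scanRow_spec land N M (b : Int)
        ⟨Int.natCast_nonneg b, hl b List.mem_cons_self⟩ (List.range N.toNat) st P
        (fun i hi => by
          have := List.mem_range.mp hi
          omega) hinv
      obtain ⟨P2, hinv2, hP2, hmem2⟩ := ih _ P1
        (fun jj hjj => hl jj (List.mem_cons_of_mem _ hjj)) hinv1
      refine ⟨P2, hinv2, fun x hx => hP2 (hP1 hx), ?_⟩
      intro jj hjj i hi hoi
      rcases List.mem_cons.mp hjj with h | h
      · subst h
        exact hP2 (hmem1 i hi hoi)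
      · exact hmem2 jj h i hi hoi

theorem scan_oils (land : List (List Int)) (N M : Int) (col : Int) :
    ((List.range M.toNat).foldl (fun st (j : ℕ) =>
        (List.range N.toNat).foldl (fun st (i : ℕ) => procCell land N M st (i : Int) (j : Int)) st)
      (fun _ _ => false, fun _ => (0 : Int))).2 col = ((Scol land N M col : ℕ) : Int) := by
  have hinv0 : ScanInv land N M (fun _ _ => false, fun _ => (0 : Int)) ∅ := by
    refine ⟨by simp, by simp, by simp, ?_⟩
    intro c
    simp
  obtain ⟨P', hinv', -, hcov⟩ := scanGrid_spec land N M (List.range M.toNat) _ ∅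
    (fun j hj => by
      have := List.mem_range.mp hj
      omega) hinv0
  have hPoil : P' = {c : Int × Int | oilCell land N M c} := by
    apply Set.Subset.antisymm
    · exact fun c hc => hinv'.2.1 c hc
    · rintro ⟨c1, c2⟩ hc
      obtain ⟨⟨h1, h2, h3, h4⟩, h5⟩ := hc
      simp only [] at h1 h2 h3 h4 h5
      have he1 : ((c1.toNat : Int)) = c1 := Int.toNat_of_nonneg h1
      have he2 : ((c2.toNat : Int)) = c2 := Int.toNat_of_nonneg h3
      have := hcov c2.toNat (List.mem_range.mpr (by omega)) c1.toNat
        (List.mem_range.mpr (by omega)) (by rw [he1, he2]; exact h5)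
      rwa [he1, he2] at this
  rw [hinv'.2.2.2 col, hPoil]
  congr 2

def idOf (M : Int) (c : Int × Int) : Int := c.1 * M + c.2

-- invariant carried by the label dictionary through build and sweeps
def LabD (land : List (List Int)) (N M : Int) (d : PySem.Dict (Int × Int) Int) : Prop :=
  d.keys.Nodup ∧ (∀ c : Int × Int, (d.get? c).isSome = true ↔ oilCell land N M c) ∧
  (∀ c v, d.get? c = some v →
    (∃ e, reachC land N M c e ∧ v = idOf M e) ∧ v ≤ idOf M c)

theorem buildRow_pres (land : List (List Int)) (N M : Int) (i : Int) (hi : 0 ≤ i ∧ i < N) :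
    ∀ (l : List ℕ) (d : PySem.Dict (Int × Int) Int), (∀ j ∈ l, ((j : Int)) < M) →
      d.keys.Nodup →
      (∀ c v, d.get? c = some v → oilCell land N M c ∧ v = idOf M c) →
      (l.foldl (fun d (j : ℕ) => if pyAt land i (j : Int) = 1
          then d.insert (i, (j : Int)) (i * M + (j : Int)) else d) d).keys.Nodup ∧
      (∀ c v, (l.foldl (fun d (j : ℕ) => if pyAt land i (j : Int) = 1
          then d.insert (i, (j : Int)) (i * M + (j : Int)) else d) d).get? c = some v →
        oilCell land N M c ∧ v = idOf M c) ∧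
      (∀ c : Int × Int, (d.get? c).isSome = true →
        ((l.foldl (fun d (j : ℕ) => if pyAt land i (j : Int) = 1
          then d.insert (i, (j : Int)) (i * M + (j : Int)) else d) d).get? c).isSome = true) ∧
      (∀ j ∈ l, pyAt land i (j : Int) = 1 →
        ((l.foldl (fun d (j : ℕ) => if pyAt land i (j : Int) = 1
          then d.insert (i, (j : Int)) (i * M + (j : Int)) else d) d).get? (i, (j : Int))).isSome = true) := by
  intro l
  induction l with
  | nil =>
      intro d _ hnd hval
      exact ⟨hnd, hval, fun c h => h, by simp⟩
  | cons a t ih =>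
      intro d hl hnd hval
      simp only [List.foldl_cons]
      set d1 := if pyAt land i (a : Int) = 1 then d.insert (i, (a : Int)) (i * M + (a : Int)) else d with hd1
      have hnd1 : d1.keys.Nodup := by
        rw [hd1]
        split_ifs
        · exact PySem.Dict.nodup_keys_insert _ _ _ hnd
        · exact hnd
      have hval1 : ∀ c v, d1.get? c = some v → oilCell land N M c ∧ v = idOf M c := by
        intro c v hc
        rw [hd1] at hc
        split_ifs at hc with hoa
        · rw [PySem.Dict.get?_insert] at hc
          split_ifs at hc with hck
          · subst hck
            have hv := Option.some_inj.mp hc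
            refine ⟨⟨⟨hi.1, hi.2, Int.natCast_nonneg a, hl a List.mem_cons_self⟩, hoa⟩, ?_⟩
            simp only [idOf]
            omega
          · exact hval c v hc
        · exact hval c v hc
      have hmono1 : ∀ c : Int × Int, (d.get? c).isSome = true → (d1.get? c).isSome = true := by
        intro c hc
        rw [hd1]
        split_ifs
        · rw [PySem.Dict.get?_insert]
          split_ifs
          · rfl
          · exact hc
        · exact hc
      obtain ⟨r1, r2, r3, r4⟩ := ih d1 (fun j hj => hl j (List.mem_cons_of_mem _ hj)) hnd1 hval1
      refine ⟨r1, r2, fun c hc => r3 c (hmono1 c hc), ?_⟩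
      intro j hj hoj
      rcases List.mem_cons.mp hj with h | h
      · subst h
        apply r3
        rw [hd1, if_pos hoj, PySem.Dict.get?_insert, if_pos rfl]
        rfl
      · exact r4 j h hoj

theorem build_LabD (land : List (List Int)) (N M : Int) :
    LabD land N M (buildLabel land N M) := by
  have main : ∀ (l : List ℕ) (d : PySem.Dict (Int × Int) Int), (∀ i ∈ l, ((i : Int)) < N) →
      d.keys.Nodup →
      (∀ c v, d.get? c = some v → oilCell land N M c ∧ v = idOf M c) →
      (l.foldl (fun d (i : ℕ) => (List.range M.toNat).foldl (fun d (j : ℕ) => if pyAt land (i : Int) (j : Int) = 1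
          then d.insert ((i : Int), (j : Int)) ((i : Int) * M + (j : Int)) else d) d) d).keys.Nodup ∧
      (∀ c v, (l.foldl (fun d (i : ℕ) => (List.range M.toNat).foldl (fun d (j : ℕ) => if pyAt land (i : Int) (j : Int) = 1
          then d.insert ((i : Int), (j : Int)) ((i : Int) * M + (j : Int)) else d) d) d).get? c = some v →
        oilCell land N M c ∧ v = idOf M c) ∧
      (∀ c : Int × Int, (d.get? c).isSome = true →
        ((l.foldl (fun d (i : ℕ) => (List.range M.toNat).foldl (fun d (j : ℕ) => if pyAt land (i : Int) (j : Int) = 1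
          then d.insert ((i : Int), (j : Int)) ((i : Int) * M + (j : Int)) else d) d) d).get? c).isSome = true) ∧
      (∀ i ∈ l, ∀ j ∈ List.range M.toNat, pyAt land (i : Int) (j : Int) = 1 →
        ((l.foldl (fun d (i : ℕ) => (List.range M.toNat).foldl (fun d (j : ℕ) => if pyAt land (i : Int) (j : Int) = 1
          then d.insert ((i : Int), (j : Int)) ((i : Int) * M + (j : Int)) else d) d) d).get? ((i : Int), (j : Int))).isSome = true) := by
    intro l
    induction l with
    | nil =>
        intro d _ hnd hval
        exact ⟨hnd, hval, fun c h => h, by simp⟩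
    | cons a t ih =>
        intro d hl hnd hval
        simp only [List.foldl_cons]
        obtain ⟨q1, q2, q3, q4⟩ := buildRow_pres land N M (a : Int)
          ⟨Int.natCast_nonneg a, hl a List.mem_cons_self⟩ (List.range M.toNat) d
          (fun j hj => by
            have := List.mem_range.mp hj
            omega) hnd hval
        obtain ⟨r1, r2, r3, r4⟩ := ih _ (fun i hi => hl i (List.mem_cons_of_mem _ hi)) q1 q2
        refine ⟨r1, r2, fun c hc => r3 c (q3 c hc), ?_⟩
        intro i hi j hj hoj
        rcases List.mem_cons.mp hi with h | h
        · subst h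
          exact r3 _ (q4 j hj hoj)
        · exact r4 i h j hj hoj
  obtain ⟨r1, r2, r3, r4⟩ := main (List.range N.toNat) PySem.Dict.empty
    (fun i hi => by
      have := List.mem_range.mp hi
      omega) (by simp [PySem.Dict.keys_empty]) (by simp [PySem.Dict.get?_empty])
  refine ⟨r1, ?_, ?_⟩
  · intro c
    constructor
    · intro hc
      obtain ⟨v, hv⟩ := Option.isSome_iff_exists.mp hc
      exact (r2 c v hv).1
    · rintro hc
      obtain ⟨c1, c2⟩ := c
      obtain ⟨⟨h1, h2, h3, h4⟩, h5⟩ := hc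
      simp only [] at h1 h2 h3 h4 h5
      have he1 : ((c1.toNat : Int)) = c1 := Int.toNat_of_nonneg h1
      have he2 : ((c2.toNat : Int)) = c2 := Int.toNat_of_nonneg h3
      have := r4 c1.toNat (List.mem_range.mpr (by omega)) c2.toNat
        (List.mem_range.mpr (by omega)) (by rw [he1, he2]; exact h5)
      rwa [he1, he2] at this
  · intro c v hc
    obtain ⟨ho, hv⟩ := r2 c v hc
    exact ⟨⟨c, Relation.ReflTransGen.refl, hv⟩, le_of_eq hv⟩

def swInner (cell : Int × Int) :
    (PySem.Dict (Int × Int) Int × Bool) → (Int × Int) → (PySem.Dict (Int × Int) Int × Bool) :=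
  fun st nb => match st.1.get? nb, st.1.get? cell with
    | some vn, some vc => if vn < vc then (st.1.insert cell vn, true) else st
    | _, _ => st

theorem sweepStep_eq (st : PySem.Dict (Int × Int) Int × Bool) (cell : Int × Int) :
    sweepStep st cell = (nbrsB cell).foldl (swInner cell) st := rfl

theorem LabD_nonneg (land : List (List Int)) (N M : Int) {d : PySem.Dict (Int × Int) Int}
    (h : LabD land N M d) {c : Int × Int} {v : Int} (hc : d.get? c = some v) : 0 ≤ v := by
  obtain ⟨⟨e, he1, he2⟩, -⟩ := h.2.2 c v hc
  have hco : oilCell land N M c := (h.2.1 c).mp (by rw [hc]; rfl)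
  have heo : oilCell land N M e := reachC_oil land N M hco he1
  obtain ⟨⟨g1, g2, g3, g4⟩, -⟩ := heo
  rw [he2]
  unfold idOf
  nlinarith

theorem sum_update_lt (k : Int × Int) (vc vn : Int) (h0 : 0 ≤ vn) (hlt : vn < vc) :
    ∀ (l : List ((Int × Int) × Int)), (l.map Prod.fst).Nodup → (k, vc) ∈ l →
    (((l.map (fun p => if p.1 == k then (k, vn) else p)).map Prod.snd).map Int.toNat).sum
      < ((l.map Prod.snd).map Int.toNat).sum := by
  intro l
  induction l with
  | nil => simp
  | cons p t ih =>
      intro hnd hmem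
      simp only [List.map_cons, List.sum_cons]
      by_cases hpk : p.1 = k
      · have hp : p = (k, vc) := by
          rcases List.mem_cons.mp hmem with h | h
          · exact h.symm
          · exfalso
            have : k ∈ t.map Prod.fst := List.mem_map.mpr ⟨(k, vc), h, rfl⟩
            rw [← hpk] at this
            exact (List.nodup_cons.mp (by simpa using hnd)).1 this
        have htid : t.map (fun p => if p.1 == k then (k, vn) else p) = t := by
          apply List.map_congr_left ?_ |>.trans (List.map_id t)
          intro q hq
          have hqk : q.1 ≠ k := by
            intro hq1
            have : k ∈ t.map Prod.fst := List.mem_map.mpr ⟨q, hq, hq1⟩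
            rw [hp] at hnd
            exact (List.nodup_cons.mp (by simpa using hnd)).1 this
          simp [hqk]
        rw [htid, hp]
        simp only [beq_self_eq_true, if_pos]
        have : vn.toNat < vc.toNat := by omega
        omega
      · have hmem' : (k, vc) ∈ t := by
          rcases List.mem_cons.mp hmem with h | h
          · exact absurd (congrArg Prod.fst h.symm) hpk
          · exact h
        have := ih (by simpa using (List.nodup_cons.mp (by simpa using hnd)).2) hmem'
        simp only [show (p.1 == k) = false from beq_eq_false_iff_ne.mpr hpk, Bool.false_eq_true,
          if_false]
        omega

theorem valsum_insert_lt (d : PySem.Dict (Int × Int) Int) (k : Int × Int) (vc vn : Int)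
    (hnd : d.keys.Nodup) (hk : d.get? k = some vc) (h0 : 0 ≤ vn) (hlt : vn < vc) :
    valsum (d.insert k vn) < valsum d := by
  unfold valsum
  have hcont : d.contains k = true := by
    rw [PySem.Dict.contains_eq_isSome_get?, hk]
    rfl
  have hvals : (d.insert k vn).values
      = ((d.items.map (fun p => if p.1 == k then (k, vn) else p)).map Prod.snd) := by
    simp only [PySem.Dict.values, PySem.Dict.items_insert_of_contains d vn hcont]
  rw [hvals]
  have hnd' : (d.items.map Prod.fst).Nodup := by
    simpa only [PySem.Dict.keys] using hnd
  have := sum_update_lt k vc vn h0 hlt d.items hnd' (PySem.Dict.mem_items_of_get?_eq_some d hk)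
  simpa only [PySem.Dict.values] using this

theorem nbrsB_dist (cell : Int × Int) :
    ∀ nb ∈ nbrsB cell, (cell.1 - nb.1).natAbs + (cell.2 - nb.2).natAbs = 1 := by
  intro nb hnb
  fin_cases hnb <;> simp

theorem swInner_or (land : List (List Int)) (N M : Int) (cell : Int × Int)
    (st : PySem.Dict (Int × Int) Int × Bool) (nb : Int × Int)
    (hdist : (cell.1 - nb.1).natAbs + (cell.2 - nb.2).natAbs = 1)
    (hlab : LabD land N M st.1) :
    swInner cell st nb = st ∨
      ((swInner cell st nb).2 = true ∧ LabD land N M (swInner cell st nb).1 ∧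
        valsum (swInner cell st nb).1 < valsum st.1) := by
  unfold swInner
  cases hnb : st.1.get? nb with
  | none => exact Or.inl rfl
  | some vn =>
      cases hcell : st.1.get? cell with
      | none => exact Or.inl rfl
      | some vc =>
          dsimp only
          by_cases hlt : vn < vc
          · rw [if_pos hlt]
            right
            have hvn0 : 0 ≤ vn := LabD_nonneg land N M hlab hnb
            have hno : oilCell land N M nb := (hlab.2.1 nb).mp (by rw [hnb]; rfl)
            have hco : oilCell land N M cell := (hlab.2.1 cell).mp (by rw [hcell]; rfl)
            obtain ⟨⟨e, he1, he2⟩, hle⟩ := hlab.2.2 nb vn hnb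
            obtain ⟨-, hlec⟩ := hlab.2.2 cell vc hcell
            refine ⟨rfl, ⟨?_, ?_, ?_⟩, ?_⟩
            · exact PySem.Dict.nodup_keys_insert _ _ _ hlab.1
            · intro c
              rw [PySem.Dict.get?_insert]
              split_ifs with hck
              · subst hck
                simp only [Option.isSome_some, true_iff]
                exact hco
              · exact hlab.2.1 c
            · intro c v hv
              rw [PySem.Dict.get?_insert] at hv
              split_ifs at hv with hck
              · subst hck
                have hveq : v = vn := (Option.some_inj.mp hv).symm
                subst hveq
                refine ⟨⟨e, Relation.ReflTransGen.head ⟨hco, hno, hdist⟩ he1, he2⟩, by omega⟩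
              · exact hlab.2.2 c v hv
            · exact valsum_insert_lt st.1 cell vc vn hlab.1 hcell hvn0 hlt
          · rw [if_neg hlt]
            exact Or.inl rfl

theorem swInnerFold_or (land : List (List Int)) (N M : Int) (cell : Int × Int) :
    ∀ (ns : List (Int × Int)) (st : PySem.Dict (Int × Int) Int × Bool),
      (∀ nb ∈ ns, (cell.1 - nb.1).natAbs + (cell.2 - nb.2).natAbs = 1) →
      LabD land N M st.1 →
      ns.foldl (swInner cell) st = st ∨
        ((ns.foldl (swInner cell) st).2 = true ∧ LabD land N M (ns.foldl (swInner cell) st).1 ∧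
          valsum (ns.foldl (swInner cell) st).1 < valsum st.1) := by
  intro ns
  induction ns with
  | nil => exact fun st _ h => Or.inl rfl
  | cons nb t ih =>
      intro st hd hlab
      simp only [List.foldl_cons]
      rcases swInner_or land N M cell st nb (hd nb List.mem_cons_self) hlab with h1 | ⟨hf, hl, hv⟩
      · rw [h1]
        exact ih st (fun x hx => hd x (List.mem_cons_of_mem _ hx)) hlab
      · rcases ih (swInner cell st nb) (fun x hx => hd x (List.mem_cons_of_mem _ hx)) hl with
          h2 | ⟨hf2, hl2, hv2⟩
        · rw [h2]
          exact Or.inr ⟨hf, hl, hv⟩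
        · exact Or.inr ⟨hf2, hl2, by omega⟩

theorem sweepFold_or (land : List (List Int)) (N M : Int) :
    ∀ (ks : List (Int × Int)) (st : PySem.Dict (Int × Int) Int × Bool),
      LabD land N M st.1 →
      ks.foldl sweepStep st = st ∨
        ((ks.foldl sweepStep st).2 = true ∧ LabD land N M (ks.foldl sweepStep st).1 ∧
          valsum (ks.foldl sweepStep st).1 < valsum st.1) := by
  intro ks
  induction ks with
  | nil => exact fun st h => Or.inl rfl
  | cons cell t ih =>
      intro st hlab
      simp only [List.foldl_cons, sweepStep_eq]
      rcases swInnerFold_or land N M cell (nbrsB cell) st (nbrsB_dist cell) hlab with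
        h1 | ⟨hf, hl, hv⟩
      · rw [h1]
        exact ih st hlab
      · rcases ih _ hl with h2 | ⟨hf2, hl2, hv2⟩
        · rw [h2]
          exact Or.inr ⟨hf, hl, hv⟩
        · exact Or.inr ⟨hf2, hl2, by omega⟩

theorem propagate_fix (land : List (List Int)) (N M : Int) :
    ∀ (fuel : ℕ) (d : PySem.Dict (Int × Int) Int), LabD land N M d → valsum d < fuel →
      LabD land N M (propagate fuel d) ∧ sweep (propagate fuel d) = (propagate fuel d, false) := by
  intro fuel
  induction fuel with
  | zero => exact fun d _ h => absurd h (by omega)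
  | succ f ih =>
      intro d hlab hfuel
      have hsucc : propagate (f + 1) d
          = if (sweep d).2 then propagate f (sweep d).1 else (sweep d).1 := rfl
      rcases sweepFold_or land N M d.keys (d, false) hlab with h1 | ⟨hf, hl, hv⟩
      · have hsw : sweep d = (d, false) := h1
        rw [hsucc, hsw]
        simp only [Bool.false_eq_true, if_false]
        exact ⟨hlab, hsw⟩
      · rw [hsucc, show (sweep d).2 = true from hf]
        simp only [if_true]
        exact ih (sweep d).1 hl (by
          have : valsum (sweep d).1 < valsum d := hv
          omega)

theorem swInner_flag_mono (cell : Int × Int) (st : PySem.Dict (Int × Int) Int × Bool)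
    (nb : Int × Int) (h : st.2 = true) : (swInner cell st nb).2 = true := by
  unfold swInner
  cases st.1.get? nb with
  | none => exact h
  | some vn =>
      cases st.1.get? cell with
      | none => exact h
      | some vc =>
          dsimp only
          split_ifs
          · rfl
          · exact h

theorem swInnerFold_flag_mono (cell : Int × Int) :
    ∀ (ns : List (Int × Int)) (st : PySem.Dict (Int × Int) Int × Bool), st.2 = true →
      (ns.foldl (swInner cell) st).2 = true := by
  intro ns
  induction ns with
  | nil => exact fun st h => h
  | cons nb t ih =>
      intro st h
      simp only [List.foldl_cons]
      exact ih _ (swInner_flag_mono cell st nb h)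

theorem sweepStep_flag_mono (st : PySem.Dict (Int × Int) Int × Bool) (cell : Int × Int)
    (h : st.2 = true) : (sweepStep st cell).2 = true := by
  rw [sweepStep_eq]
  exact swInnerFold_flag_mono cell _ st h

theorem sweepFold_flag_mono :
    ∀ (ks : List (Int × Int)) (st : PySem.Dict (Int × Int) Int × Bool), st.2 = true →
      (ks.foldl sweepStep st).2 = true := by
  intro ks
  induction ks with
  | nil => exact fun st h => h
  | cons cell t ih =>
      intro st h
      simp only [List.foldl_cons]
      exact ih _ (sweepStep_flag_mono st cell h)

theorem swInner_false (cell : Int × Int) (st : PySem.Dict (Int × Int) Int × Bool)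
    (nb : Int × Int) (h : (swInner cell st nb).2 = false) :
    swInner cell st nb = st ∧
      (∀ vn vc, st.1.get? nb = some vn → st.1.get? cell = some vc → vc ≤ vn) := by
  revert h
  unfold swInner
  cases hnb : st.1.get? nb with
  | none => exact fun _ => ⟨rfl, by simp⟩
  | some vn =>
      cases hcell : st.1.get? cell with
      | none => exact fun _ => ⟨rfl, fun vn' vc' _ h2 => by cases h2⟩

      | some vc =>
          dsimp only
          split_ifs with hlt
          · intro h
            cases h
          · intro h
            refine ⟨rfl, ?_⟩
            intro vn' vc' h1 h2
            have e1 := Option.some_inj.mp h1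
            have e2 := Option.some_inj.mp h2
            omega

theorem swInnerFold_false (cell : Int × Int) :
    ∀ (ns : List (Int × Int)) (st : PySem.Dict (Int × Int) Int × Bool),
      (ns.foldl (swInner cell) st).2 = false →
      ns.foldl (swInner cell) st = st ∧
        (∀ nb ∈ ns, ∀ vn vc, st.1.get? nb = some vn → st.1.get? cell = some vc → vc ≤ vn) := by
  intro ns
  induction ns with
  | nil => exact fun st _ => ⟨rfl, by simp⟩
  | cons nb t ih =>
      intro st hflag
      simp only [List.foldl_cons] at hflag ⊢
      have h1 : (swInner cell st nb).2 = false := by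
        cases hb : (swInner cell st nb).2
        · rfl
        · rw [swInnerFold_flag_mono cell t _ hb] at hflag
          cases hflag
      obtain ⟨hid, hcond⟩ := swInner_false cell st nb h1
      rw [hid] at hflag ⊢
      obtain ⟨hid2, hcond2⟩ := ih st hflag
      refine ⟨hid2, ?_⟩
      intro x hx
      rcases List.mem_cons.mp hx with h | h
      · subst h
        exact hcond
      · exact hcond2 x h

theorem sweepFold_false :
    ∀ (ks : List (Int × Int)) (st : PySem.Dict (Int × Int) Int × Bool),
      (ks.foldl sweepStep st).2 = false →
      ks.foldl sweepStep st = st ∧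
        (∀ cell ∈ ks, ∀ nb ∈ nbrsB cell, ∀ vn vc,
          st.1.get? nb = some vn → st.1.get? cell = some vc → vc ≤ vn) := by
  intro ks
  induction ks with
  | nil => exact fun st _ => ⟨rfl, by simp⟩
  | cons cell t ih =>
      intro st hflag
      simp only [List.foldl_cons] at hflag ⊢
      have h1 : (sweepStep st cell).2 = false := by
        cases hb : (sweepStep st cell).2
        · rfl
        · rw [sweepFold_flag_mono t _ hb] at hflag
          cases hflag
      rw [sweepStep_eq] at h1
      obtain ⟨hid, hcond⟩ := swInnerFold_false cell (nbrsB cell) st h1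
      rw [sweepStep_eq, hid] at hflag ⊢
      obtain ⟨hid2, hcond2⟩ := ih st hflag
      refine ⟨hid2, ?_⟩
      intro x hx
      rcases List.mem_cons.mp hx with h | h
      · subst h
        exact hcond
      · exact hcond2 x h

theorem fix_pointwise (d : PySem.Dict (Int × Int) Int) (hfix : sweep d = (d, false)) :
    ∀ cell ∈ d.keys, ∀ nb ∈ nbrsB cell, ∀ vn vc,
      d.get? nb = some vn → d.get? cell = some vc → vc ≤ vn := by
  have hflag : (d.keys.foldl sweepStep (d, false)).2 = false := by
    rw [show d.keys.foldl sweepStep (d, false) = sweep d from rfl, hfix]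
  exact (sweepFold_false d.keys (d, false) hflag).2

theorem adj_mem_nbrsB (land : List (List Int)) (N M : Int) {b e : Int × Int}
    (h : adjC land N M b e) : e ∈ nbrsB b := by
  obtain ⟨δ, hδ, hee⟩ := adjC_cases land N M h
  subst hee
  fin_cases hδ <;> simp [nbrsB, Prod.ext_iff] <;> omega

theorem idOf_inj (N M : Int) {w w' : Int × Int} (hw : inGrid N M w) (hw' : inGrid N M w')
    (h : idOf M w = idOf M w') : w = w' := by
  obtain ⟨h1, h2, h3, h4⟩ := hw
  obtain ⟨g1, g2, g3, g4⟩ := hw'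
  unfold idOf at h
  have hM : (w'.1 - w.1) * M = w.2 - w'.2 := by ring_nf; linarith
  have h1eq : w.1 = w'.1 := by
    rcases lt_trichotomy w.1 w'.1 with hlt | heq | hgt
    · have : 1 * M ≤ (w'.1 - w.1) * M := by
        apply mul_le_mul_of_nonneg_right (by omega) (by omega)
      omega
    · exact heq
    · have : (w'.1 - w.1) * M ≤ (-1) * M := by
        apply mul_le_mul_of_nonneg_right (by omega) (by omega)
      omega
  refine Prod.ext_iff.mpr ⟨h1eq, ?_⟩
  rw [h1eq] at h
  omega

theorem label_key_iff (land : List (List Int)) (N M : Int) {d : PySem.Dict (Int × Int) Int}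
    (hlab : LabD land N M d) (c : Int × Int) : c ∈ d.keys ↔ oilCell land N M c := by
  rw [← hlab.2.1 c]
  constructor
  · intro h
    cases hg : d.get? c
    · exact absurd ((PySem.Dict.get?_eq_none_iff_not_mem_keys d c).mp hg) (fun hh => hh h)
    · rfl
  · intro h
    by_contra hmem
    rw [(PySem.Dict.get?_eq_none_iff_not_mem_keys d c).mpr hmem] at h
    cases h

theorem label_le (land : List (List Int)) (N M : Int) {d : PySem.Dict (Int × Int) Int}
    (hlab : LabD land N M d) (hfix : sweep d = (d, false)) :
    ∀ {c e : Int × Int}, reachC land N M c e → ∀ {vc ve : Int},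
      d.get? c = some vc → d.get? e = some ve → vc ≤ ve := by
  intro c e hr
  induction hr with
  | refl =>
      intro vc ve h1 h2
      rw [h1] at h2
      have := Option.some_inj.mp h2
      omega
  | tail hcb hbe ih =>
      intro vc ve h1 h2
      have hbo : oilCell land N M _ := hbe.1
      have hbs : (d.get? _).isSome = true := (hlab.2.1 _).mpr hbo
      obtain ⟨vb, hvb⟩ := Option.isSome_iff_exists.mp hbs
      have hstep : vb ≤ ve := by
        refine fix_pointwise d hfix _ ?_ _ (adj_mem_nbrsB land N M hbe) ve vb h2 hvb
        exact (label_key_iff land N M hlab _).mpr hbo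
      have := ih h1 hvb
      omega

theorem label_eq_iff (land : List (List Int)) (N M : Int) {d : PySem.Dict (Int × Int) Int}
    (hlab : LabD land N M d) (hfix : sweep d = (d, false))
    {c e : Int × Int} {vc ve : Int} (hc : d.get? c = some vc) (he : d.get? e = some ve) :
    vc = ve ↔ reachC land N M c e := by
  constructor
  · intro hv
    obtain ⟨⟨w, hw1, hw2⟩, hwle⟩ := hlab.2.2 c vc hc
    obtain ⟨⟨w', hw'1, hw'2⟩, hw'le⟩ := hlab.2.2 e ve he
    have hco : oilCell land N M c := (hlab.2.1 c).mp (by rw [hc]; rfl)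
    have heo : oilCell land N M e := (hlab.2.1 e).mp (by rw [he]; rfl)
    have hwo : oilCell land N M w := reachC_oil land N M hco hw1
    have hw'o : oilCell land N M w' := reachC_oil land N M heo hw'1
    have hww' : w = w' := idOf_inj N M hwo.1 hw'o.1 (by omega)
    subst hww'
    exact Relation.ReflTransGen.trans hw1 (reachC_symm land N M hw'1)
  · intro hr
    have h1 := label_le land N M hlab hfix hr hc he
    have h2 := label_le land N M hlab hfix (reachC_symm land N M hr) he hc
    omega

theorem colFold_mem (lab : PySem.Dict (Int × Int) Int) (col : Int) :
    ∀ (l : List ℕ) (s : PySem.Set Int) (v : Int),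
      (v ∈ l.foldl (fun s (i : ℕ) => match lab.get? ((i : Int), col) with
          | some w => PySem.Set.add s w
          | none => s) s
        ↔ v ∈ s ∨ ∃ i ∈ l, lab.get? ((i : Int), col) = some v) := by
  intro l
  induction l with
  | nil => simp
  | cons a t ih =>
      intro s v
      simp only [List.foldl_cons]
      cases hga : lab.get? ((a : Int), col) with
      | none =>
          rw [ih]
          simp only [List.mem_cons]
          constructor
          · rintro (h | ⟨i, hi, hv⟩)
            · exact Or.inl h
            · exact Or.inr ⟨i, Or.inr hi, hv⟩
          · rintro (h | ⟨i, hi, hv⟩)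
            · exact Or.inl h
            · rcases hi with h1 | h1
              · subst h1
                rw [hga] at hv
                cases hv
              · exact Or.inr ⟨i, h1, hv⟩
      | some w =>
          rw [ih]
          simp only [PySem.Set.mem_add, List.mem_cons]
          constructor
          · rintro ((h | h) | ⟨i, hi, hv⟩)
            · exact Or.inl h
            · exact Or.inr ⟨a, Or.inl rfl, by rw [hga, h]⟩
            · exact Or.inr ⟨i, Or.inr hi, hv⟩
          · rintro (h | ⟨i, hi, hv⟩)
            · exact Or.inl (Or.inl h)
            · rcases hi with h1 | h1
              · subst h1
                rw [hga] at hv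
                exact Or.inl (Or.inr (Option.some_inj.mp hv).symm)
              · exact Or.inr ⟨i, h1, hv⟩

theorem filter_length_ncard (l : List (Int × Int)) (p : (Int × Int) → Bool) (hnd : l.Nodup)
    (S : Set (Int × Int)) (hS : ∀ c, (c ∈ l ∧ p c = true) ↔ c ∈ S) :
    (l.filter p).length = S.ncard := by
  have hset : S = ↑(l.filter p).toFinset := by
    ext c
    rw [← hS c]
    simp
  rw [hset, Set.ncard_coe_finset, List.toFinset_card_of_nodup (hnd.filter p)]

theorem Bcol_eq (land : List (List Int)) (N M : Int) {lab : PySem.Dict (Int × Int) Int}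
    (hlab : LabD land N M lab) (hfix : sweep lab = (lab, false)) (col : Int) :
    (lab.keys.filter (fun c => ((List.range N.toNat).foldl (fun s (i : ℕ) =>
        match lab.get? ((i : Int), col) with
        | some v => PySem.Set.add s v
        | none => s) PySem.Set.empty).contains (lab.getD c 0))).length
      = Scol land N M col := by
  apply filter_length_ncard _ _ hlab.1
  intro c
  simp only [Set.mem_setOf_eq]
  constructor
  · rintro ⟨hmem, hp⟩
    have hco : oilCell land N M c := (label_key_iff land N M hlab c).mp hmem
    obtain ⟨vc, hvc⟩ := Option.isSome_iff_exists.mp ((hlab.2.1 c).mpr hco)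
    have hgetD : lab.getD c 0 = vc := by
      rw [PySem.Dict.getD_eq_get?_getD, hvc]
      rfl
    rw [hgetD] at hp
    have hmemS := (PySem.Set.contains_iff _ vc).mp hp
    obtain ⟨i, hi, hgi⟩ := ((colFold_mem lab col (List.range N.toNat)
      PySem.Set.empty vc).mp hmemS).resolve_left (by simp [PySem.Set.empty])
    have hreach := (label_eq_iff land N M hlab hfix hvc hgi).mp rfl
    exact ⟨hco, (i : Int), hreach⟩
  · rintro ⟨hco, x, hx⟩
    have hmem : c ∈ lab.keys := (label_key_iff land N M hlab c).mpr hco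
    obtain ⟨vc, hvc⟩ := Option.isSome_iff_exists.mp ((hlab.2.1 c).mpr hco)
    have heo : oilCell land N M (x, col) := reachC_oil land N M hco hx
    obtain ⟨ve, hve⟩ := Option.isSome_iff_exists.mp ((hlab.2.1 (x, col)).mpr heo)
    have hveq : vc = ve := (label_eq_iff land N M hlab hfix hvc hve).mpr hx
    have hgetD : lab.getD c 0 = vc := by
      rw [PySem.Dict.getD_eq_get?_getD, hvc]
      rfl
    refine ⟨hmem, ?_⟩
    rw [hgetD]
    apply (PySem.Set.contains_iff _ vc).mpr
    apply (colFold_mem lab col (List.range N.toNat) PySem.Set.empty vc).mpr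
    right
    obtain ⟨⟨hx1, hx2, -, -⟩, -⟩ := heo
    simp only [] at hx1 hx2
    refine ⟨x.toNat, List.mem_range.mpr (by omega), ?_⟩
    rw [Int.toNat_of_nonneg hx1, hveq]
    exact hve

theorem max_getD_eq_fold (l : List Int) (h0 : ∀ x ∈ l, 0 ≤ x) :
    (PySem.List.max? l (fun x => x)).getD 0 = l.foldl (fun b t => if t > b then t else b) 0 := by
  cases l with
  | nil => rfl
  | cons x t =>
      rw [PySem.List.max?_id_cons]
      simp only [Option.getD_some, List.foldl_cons]
      have hx0 : (if x > 0 then x else 0) = x := by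
        have := h0 x List.mem_cons_self
        split_ifs <;> omega
      rw [hx0]
      apply PySem.List.foldl_congr_mem
      intro acc y hy
      rcases le_or_gt y acc with h | h
      · rw [max_eq_left h, if_neg (by omega)]
      · rw [max_eq_right (by omega), if_pos (by omega)]

theorem solution_main (land : List (List Int)) : solution land = solution_alt land := by
  set N : Int := PySem.List.len land with hN
  set M : Int := PySem.List.len (land.headD []) with hM
  have hA : solution land = (PySem.List.max? ((List.range M.toNat).map
      (fun (j : ℕ) => ((Scol land N M (j : Int) : ℕ) : Int))) (fun x => x)).getD 0 := by
    unfold solution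
    dsimp only
    rw [← hN, ← hM]
    congr 2
    apply List.map_congr_left
    intro j _
    exact scan_oils land N M (j : Int)
  have hlab0 := build_LabD land N M
  obtain ⟨hlabd, hfix⟩ := propagate_fix land N M (valsum (buildLabel land N M) + 1)
    (buildLabel land N M) hlab0 (by omega)
  have hB : solution_alt land = (List.range M.toNat).foldl (fun best (j : ℕ) =>
      if ((Scol land N M (j : Int) : ℕ) : Int) > best
      then ((Scol land N M (j : Int) : ℕ) : Int) else best) 0 := by
    unfold solution_alt
    dsimp only
    rw [← hN, ← hM]
    apply PySem.List.foldl_congr_mem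
    intro acc j _
    have h := Bcol_eq land N M hlabd hfix (j : Int)
    rw [h]
  rw [hA, hB, max_getD_eq_fold _ (by
    intro x hx
    obtain ⟨j, -, hj⟩ := List.mem_map.mp hx
    omega), List.foldl_map]

-- ===== VERDICT (by name: the statement is the Claim_ definition above) =====
theorem solution_spec : Claim_equal_solution := by
  unfold Claim_equal_solution
  intro land _ _
  unfold Spec_solution
  exact solution_main land
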